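-- pv_equiv track=rewrite | github.com/KobiShashs/Python | 23_Exceptions_Summary/2_playground.py | get_fisrt_bad_index
-- ===== SOURCE A (Python) =====
-- def get_fisrt_bad_index(username):
--         string_check = "[.@!#$%^&*()<>?/\|}{~:]'"
--         idx = 0;
--         for x in username:
--             if (x in string_check):
--                 return idx
--             else:
--                 idx+=1
--
--         return -1
-- ===== SOURCE B (Python) =====
-- def get_fisrt_bad_index(username):
--     string_check = "[.@!#$%^&*()<>?/\|}{~:]'"
--     positions = [p for p in (username.find(c) for c in string_check) if p != -1]
--     return min(positions) if positions else -1
-- ===== Notes on version B (the rewrite author's own statement) =====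
-- stated objective: faster
-- what changed: Instead of a single Python-level left-to-right scan with an index counter, B calls username.find(c) once per special character and returns the minimum non-negative position (or -1 if none), moving the per-character scanning into C-level str.find.
import Mathlib
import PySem

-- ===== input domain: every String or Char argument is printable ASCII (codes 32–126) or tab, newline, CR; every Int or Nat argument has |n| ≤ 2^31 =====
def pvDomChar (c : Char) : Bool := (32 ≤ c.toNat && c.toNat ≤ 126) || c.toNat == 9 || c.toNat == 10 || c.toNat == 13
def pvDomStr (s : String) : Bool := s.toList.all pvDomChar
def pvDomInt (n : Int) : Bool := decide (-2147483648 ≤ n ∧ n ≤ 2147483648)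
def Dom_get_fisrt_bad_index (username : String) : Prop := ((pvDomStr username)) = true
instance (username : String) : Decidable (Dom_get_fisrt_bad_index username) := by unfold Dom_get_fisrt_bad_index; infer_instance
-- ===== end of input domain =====

-- B replaces A's single indexed scan by one .find per special character plus a minimum over the hit positions; same exact result, measurably faster in Python (C-level str.find).

-- ===== PORT A =====
-- the Python literal "[.@!#$%^&*()<>?/\|}{~:]'" (its backslash is literal)
def pvStringCheck : String := "[.@!#$%^&*()<>?/\\|}{~:]'"

-- the 'for x in username' loop with the idx counter and the early return
def pvGoA : List Char → Int → Int
  | [], _ => -1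
  | x :: xs, idx => if PySem.Str.isIn (String.ofList [x]) pvStringCheck then idx else pvGoA xs (idx + 1)

def get_fisrt_bad_index (username : String) : Int := pvGoA username.toList 0

-- ===== PORT B =====
def get_fisrt_bad_index_alt (username : String) : Int :=
  let positions : List Int :=
    (pvStringCheck.toList.map (fun c => PySem.Str.find username (String.ofList [c]))).filter
      (fun p => p ≠ -1)
  match PySem.List.min? positions (fun p => p) with
  | some m => m
  | none => -1

-- ===== PRECONDITION & SPEC =====
def Spec_get_fisrt_bad_index (username : String) (out : Int) : Prop := out = get_fisrt_bad_index_alt username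
instance (username : String) (out : Int) : Decidable (Spec_get_fisrt_bad_index username out) := by unfold Spec_get_fisrt_bad_index; infer_instance

-- ===== CLAIM (what is proved, stated in full; the proofs are below) =====
def Claim_equal_get_fisrt_bad_index : Prop := ∀ (username : String), Dom_get_fisrt_bad_index username → Spec_get_fisrt_bad_index username (get_fisrt_bad_index username)

-- ===== LEMMAS AND PROOFS =====

-- shifting the start index of Chars.find.go for a single-char pattern
theorem pvGo_succ (c : Char) (l : List Char) (k : Nat) :
    PySem.Chars.find.go [c] l (k + 1) =
      (if PySem.Chars.find.go [c] l k = -1 then -1 else PySem.Chars.find.go [c] l k + 1) := by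
  induction l generalizing k with
  | nil => simp [PySem.Chars.find.go]
  | cons x xs ih =>
      by_cases h : ([c].isPrefixOf (x :: xs) : Bool) = true
      · rw [show PySem.Chars.find.go [c] (x :: xs) (k + 1) = ((k : Int) + 1) from by
          simp [PySem.Chars.find.go, h],
          show PySem.Chars.find.go [c] (x :: xs) k = (k : Int) from by
          simp [PySem.Chars.find.go, h]]
        rw [if_neg (by omega)]
      · rw [show PySem.Chars.find.go [c] (x :: xs) (k + 1) =
              PySem.Chars.find.go [c] xs (k + 1 + 1) from by
          simp [PySem.Chars.find.go, h],
          show PySem.Chars.find.go [c] (x :: xs) k =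
              PySem.Chars.find.go [c] xs (k + 1) from by
          simp [PySem.Chars.find.go, h]]
        exact ih (k + 1)

-- cons characterization of find for a single-char pattern
theorem pvFind_cons (c x : Char) (xs : List Char) :
    PySem.Chars.find (x :: xs) [c] =
      (if c = x then 0
       else if PySem.Chars.find xs [c] = -1 then -1 else PySem.Chars.find xs [c] + 1) := by
  unfold PySem.Chars.find
  by_cases h : c = x
  · subst h
    simp [PySem.Chars.find.go, List.isPrefixOf]
  · have hpre : ([c].isPrefixOf (x :: xs) : Bool) = false := by
      simp [List.isPrefixOf, h]
    rw [if_neg h,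
      show PySem.Chars.find.go [c] (x :: xs) 0 = PySem.Chars.find.go [c] xs (0 + 1) from by
        simp [PySem.Chars.find.go, hpre]]
    exact pvGo_succ c xs 0

theorem pvFind_nil (c : Char) : PySem.Chars.find [] [c] = -1 := by
  simp [PySem.Chars.find, PySem.Chars.find.go, List.isEmpty]

-- [x] is an infix of S iff x ∈ S
theorem pvSingleton_infix_iff (x : Char) (S : List Char) : [x] <:+: S ↔ x ∈ S := by
  constructor
  · intro h
    exact h.mem (List.mem_singleton_self x)
  · intro h
    obtain ⟨s, t, rfl⟩ := List.append_of_mem h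
    exact ⟨s, t, by simp⟩

-- the foldl inside min? commutes with adding 1 everywhere
theorem pvMinFold_shift (L : List Int) (acc : Option Int) :
    List.foldl
        (fun acc x => match acc with
          | none => some x
          | some m => if x < m then some x else some m)
        (acc.map (· + 1)) (L.map (· + 1)) =
      (List.foldl
        (fun acc x => match acc with
          | none => some x
          | some m => if x < m then some x else some m)
        acc L).map (· + 1) := by
  induction L generalizing acc with
  | nil => rfl
  | cons y ys ih =>
      cases acc with
      | none => simpa using ih (some y)
      | some m =>
          by_cases h : y < m
          · simp only [List.map_cons, List.foldl_cons, Option.map_some]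
            rw [if_pos (by omega), if_pos h]
            exact ih (some y)
          · simp only [List.map_cons, List.foldl_cons, Option.map_some]
            rw [if_neg (by omega), if_neg h]
            exact ih (some m)

theorem pvMin?_map_succ (L : List Int) :
    PySem.List.min? (L.map (· + 1)) (fun p => p) =
      (PySem.List.min? L (fun p => p)).map (· + 1) := by
  unfold PySem.List.min?
  refine Eq.trans (List.foldl_ext _
      (fun acc x => match acc with
        | none => some x
        | some m => if x < m then some x else some m)
      _ (fun a b _ => by cases a <;> rfl)) ?_
  refine Eq.trans (by simpa using pvMinFold_shift L none) ?_
  exact congrArg (Option.map (· + 1)) (List.foldl_ext _ _ _ (fun a b _ => by cases a <;> rfl))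

-- filtering ≠ -1 after the shifted map = shifting after filtering, given all entries ≥ -1
theorem pvFilter_shift (L : List Int) (h : ∀ p ∈ L, -1 ≤ p) :
    (L.map (fun p => if p = -1 then -1 else p + 1)).filter (fun p => p ≠ -1) =
      (L.filter (fun p => p ≠ -1)).map (· + 1) := by
  induction L with
  | nil => rfl
  | cons y ys ih =>
      have hy : -1 ≤ y := h y (List.mem_cons_self)
      have ihy := ih (fun p hp => h p (List.mem_cons_of_mem _ hp))
      simp only [ne_eq, decide_not] at ihy ⊢
      by_cases hne : y = -1
      · subst hne
        simpa using ihy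
      · have h1 : y + 1 ≠ -1 := by omega
        simp [hne, h1, ihy]

-- the list-level value of B
def pvBval (l : List Char) : Int :=
  match PySem.List.min?
      ((pvStringCheck.toList.map (fun c => PySem.Chars.find l [c])).filter (fun p => p ≠ -1))
      (fun p => p) with
  | some m => m
  | none => -1

theorem pvBval_ge (l : List Char) : -1 ≤ pvBval l := by
  unfold pvBval
  cases hmin : PySem.List.min?
      ((pvStringCheck.toList.map (fun c => PySem.Chars.find l [c])).filter (fun p => p ≠ -1))
      (fun p => p) with
  | none => simp
  | some m =>
      have hmem := PySem.List.min?_mem hmin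
      obtain ⟨c, _, rfl⟩ := List.mem_map.mp (List.mem_filter.mp hmem).1
      simpa using PySem.Chars.neg_one_le_find l [c]

theorem pvBval_nil : pvBval [] = -1 := by
  unfold pvBval
  rw [List.filter_eq_nil_iff.mpr (by
    intro p hp
    obtain ⟨c, hc, rfl⟩ := List.mem_map.mp hp
    simp [pvFind_nil c])]
  rfl

theorem pvBval_cons_mem (x : Char) (xs : List Char) (hx : x ∈ pvStringCheck.toList) :
    pvBval (x :: xs) = 0 := by
  unfold pvBval
  set L := (pvStringCheck.toList.map (fun c => PySem.Chars.find (x :: xs) [c])).filter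
      (fun p => p ≠ -1) with hL
  have h0 : (0 : Int) ∈ L := by
    rw [hL]
    refine List.mem_filter.mpr ⟨List.mem_map.mpr ⟨x, hx, ?_⟩, by decide⟩
    rw [pvFind_cons]; simp
  cases hmin : PySem.List.min? L (fun p => p) with
  | none =>
      rw [(PySem.List.min?_eq_none_iff L _).mp hmin] at h0
      exact absurd h0 (by simp)
  | some m =>
      have hmem := PySem.List.min?_mem hmin
      have hle : (fun p : Int => p) m ≤ (fun p : Int => p) 0 := PySem.List.min?_isMin hmin 0 h0
      have hge : -1 ≤ m := by
        obtain ⟨c, _, rfl⟩ := List.mem_map.mp (List.mem_filter.mp hmem).1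
        simpa using PySem.Chars.neg_one_le_find (x :: xs) [c]
      have hne : m ≠ -1 := by simpa using (List.mem_filter.mp hmem).2
      show m = 0
      simp only [] at hle
      omega

theorem pvBval_cons_not_mem (x : Char) (xs : List Char) (hx : x ∉ pvStringCheck.toList) :
    pvBval (x :: xs) = (if pvBval xs = -1 then -1 else pvBval xs + 1) := by
  have hmap : pvStringCheck.toList.map (fun c => PySem.Chars.find (x :: xs) [c]) =
      (pvStringCheck.toList.map (fun c => PySem.Chars.find xs [c])).map
        (fun p => if p = -1 then -1 else p + 1) := by
    rw [List.map_map]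
    refine List.map_congr_left ?_
    intro c hc
    have hcx : c ≠ x := fun h => hx (h ▸ hc)
    simp [Function.comp, pvFind_cons, hcx]
  unfold pvBval
  rw [hmap, pvFilter_shift _ (by
    intro p hp
    obtain ⟨c, _, rfl⟩ := List.mem_map.mp hp
    simpa using PySem.Chars.neg_one_le_find xs [c]), pvMin?_map_succ]
  cases hmin : PySem.List.min?
      ((pvStringCheck.toList.map (fun c => PySem.Chars.find xs [c])).filter (fun p => p ≠ -1))
      (fun p => p) with
  | none => simp
  | some m =>
      have hne : m ≠ -1 := by simpa using (List.mem_filter.mp (PySem.List.min?_mem hmin)).2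
      simp [hne]

theorem pvGoA_cons (x : Char) (xs : List Char) (idx : Int) :
    pvGoA (x :: xs) idx =
      (if PySem.Str.isIn (String.ofList [x]) pvStringCheck then idx else pvGoA xs (idx + 1)) := rfl

-- A's loop computes B's value, shifted by the running index
theorem pvMain (l : List Char) (idx : Int) :
    pvGoA l idx = (if pvBval l = -1 then -1 else idx + pvBval l) := by
  induction l generalizing idx with
  | nil => simp [pvGoA, pvBval_nil]
  | cons x xs ih =>
      have hmemb : (PySem.Str.isIn (String.ofList [x]) pvStringCheck = true) ↔
          x ∈ pvStringCheck.toList := by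
        rw [PySem.Str.isIn_eq, show (String.ofList [x]).toList = [x] from by simp,
          PySem.Chars.isIn_iff_infix, pvSingleton_infix_iff]
      by_cases hx : x ∈ pvStringCheck.toList
      · rw [pvGoA_cons, if_pos (hmemb.mpr hx), pvBval_cons_mem x xs hx]
        norm_num
      · rw [pvGoA_cons, if_neg (fun h => hx (hmemb.mp h)), ih (idx + 1),
          pvBval_cons_not_mem x xs hx]
        have hge := pvBval_ge xs
        by_cases h : pvBval xs = -1
        · simp [h]
        · rw [if_neg h, if_neg (by omega)]
          omega

-- B's port equals the list-level value
theorem pvAlt_eq (u : String) : get_fisrt_bad_index_alt u = pvBval u.toList := by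
  have halt : pvStringCheck.toList.map (fun c => PySem.Str.find u (String.ofList [c])) =
      pvStringCheck.toList.map (fun c => PySem.Chars.find u.toList [c]) := by
    refine List.map_congr_left ?_
    intro c _
    rw [PySem.Str.find_eq, show (String.ofList [c]).toList = [c] from by simp]
  unfold get_fisrt_bad_index_alt pvBval
  rw [halt]

-- ===== VERDICT (by name: the statement is the Claim_ definition above) =====
theorem get_fisrt_bad_index_spec : Claim_equal_get_fisrt_bad_index := by
  intro username _
  unfold Spec_get_fisrt_bad_index get_fisrt_bad_index
  rw [pvAlt_eq, pvMain username.toList 0]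
  by_cases h : pvBval username.toList = -1
  · simp [h]
  · rw [if_neg h]
    omega
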